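-- pv_equiv track=rewrite | github.com/ganbon/Novel2DialCorpus | src/jndc/character_name_list.py | get_name_group
-- ===== SOURCE A (Python) =====
-- def get_name_group(count_character_name_dict: dict) -> dict[str, list[str]]:
--     character_name_list = sorted(list(count_character_name_dict.keys()), key=lambda x: len(x), reverse=True)
--     character_name_group_dict = {}
--     for target_name in character_name_list:
--         character_name_group_dict[target_name] = [
--             candidate_name for candidate_name in character_name_list if candidate_name in target_name
--         ]
--     return character_name_group_dict
-- ===== SOURCE B (Python) =====
-- def get_name_group(count_character_name_dict: dict) -> dict[str, list[str]]:
--     names = sorted(count_character_name_dict.keys(), key=len, reverse=True)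
--     name_set = set(names)
--     group = {}
--     for target in names:
--         matched = set()
--         n = len(target)
--         for i in range(n + 1):
--             for j in range(i, n + 1):
--                 sub = target[i:j]
--                 if sub in name_set:
--                     matched.add(sub)
--         group[target] = [c for c in names if c in matched]
--     return group
-- ===== Notes on version B (the rewrite author's own statement) =====
-- stated objective: alternative
-- what changed: Instead of running a substring search of every candidate name against every target (A), B enumerates each target's substrings once, intersects them with a hash set of all names, and then filters the sorted name list by membership in that matched set to preserve A's output order.
import Mathlib
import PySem

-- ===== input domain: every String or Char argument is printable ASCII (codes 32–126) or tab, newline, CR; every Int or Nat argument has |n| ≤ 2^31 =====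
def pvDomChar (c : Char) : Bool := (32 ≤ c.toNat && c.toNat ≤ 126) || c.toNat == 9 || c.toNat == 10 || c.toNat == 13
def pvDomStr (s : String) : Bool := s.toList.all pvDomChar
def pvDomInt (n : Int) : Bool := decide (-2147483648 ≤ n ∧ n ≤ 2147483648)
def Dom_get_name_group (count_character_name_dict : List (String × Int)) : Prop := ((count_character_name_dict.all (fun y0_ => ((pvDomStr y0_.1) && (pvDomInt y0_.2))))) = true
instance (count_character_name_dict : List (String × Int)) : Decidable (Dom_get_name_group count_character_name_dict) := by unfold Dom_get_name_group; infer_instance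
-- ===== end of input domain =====

-- B replaces A's candidate-vs-target substring searches by enumerating each target's
-- substrings once, intersecting them with a set of all names, and filtering the sorted
-- list by membership in that matched set (objective: alternative algorithm, same output).

-- ===== PORT A =====
def get_name_group (count_character_name_dict : List (String × Int)) : List (String × List String) :=
  let character_name_list :=
    PySem.List.sorted (PySem.Dict.keys (PySem.Dict.ofList count_character_name_dict))
      (fun x => PySem.Str.len x) true
  (character_name_list.foldl
    (fun character_name_group_dict target_name =>
      PySem.Dict.insert character_name_group_dict target_name
        (character_name_list.filter
          (fun candidate_name => PySem.Str.isIn candidate_name target_name)))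
    (PySem.Dict.empty : PySem.Dict String (List String))).items

-- ===== PORT B =====
def get_name_group_alt (count_character_name_dict : List (String × Int)) : List (String × List String) :=
  let names :=
    PySem.List.sorted (PySem.Dict.keys (PySem.Dict.ofList count_character_name_dict))
      (fun x => PySem.Str.len x) true
  let name_set := PySem.Set.ofList names
  (names.foldl
    (fun group target =>
      let n := PySem.Str.len target
      let matched :=
        (PySem.List.pyRange 0 (n + 1) 1).foldl
          (fun m i =>
            (PySem.List.pyRange i (n + 1) 1).foldl
              (fun m j =>
                let sub := PySem.Str.slice target (some i) (some j)
                if PySem.Set.contains name_set sub then PySem.Set.add m sub else m)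
              m)
          PySem.Set.empty
      PySem.Dict.insert group target (names.filter (fun c => PySem.Set.contains matched c)))
    (PySem.Dict.empty : PySem.Dict String (List String))).items

-- ===== PRECONDITION & SPEC =====
def Spec_get_name_group (count_character_name_dict : List (String × Int)) (out : List (String × List String)) : Prop := out = get_name_group_alt count_character_name_dict
instance (count_character_name_dict : List (String × Int)) (out : List (String × List String)) : Decidable (Spec_get_name_group count_character_name_dict out) := by unfold Spec_get_name_group; infer_instance

-- ===== CLAIM (what is proved, stated in full; the proofs are below) =====
def Claim_equal_get_name_group : Prop := ∀ (count_character_name_dict : List (String × Int)), Dom_get_name_group count_character_name_dict → Spec_get_name_group count_character_name_dict (get_name_group count_character_name_dict)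

-- ===== LEMMAS AND PROOFS =====

-- membership in the inner "add if the substring is a name" fold
lemma mem_foldl_addif (l : List Int) (g : Int → String) (P : String → Bool)
    (m : PySem.Set String) (x : String) :
    (x ∈ l.foldl (fun m j => if P (g j) then PySem.Set.add m (g j) else m) m) ↔
      x ∈ m ∨ ∃ j ∈ l, P (g j) = true ∧ x = g j := by
  induction l generalizing m with
  | nil => simp
  | cons a l ih =>
    simp only [List.foldl_cons, ih, List.mem_cons]
    by_cases h : P (g a) = true
    · simp only [h, if_true, PySem.Set.mem_add]
      constructor
      · rintro (⟨hm | rfl⟩ | ⟨j, hj, hp, rfl⟩)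
        · exact Or.inl hm
        · exact Or.inr ⟨a, Or.inl rfl, h, rfl⟩
        · exact Or.inr ⟨j, Or.inr hj, hp, rfl⟩
      · rintro (hm | ⟨j, (rfl | hj), hp, rfl⟩)
        · exact Or.inl (Or.inl hm)
        · exact Or.inl (Or.inr rfl)
        · exact Or.inr ⟨j, hj, hp, rfl⟩
  -- in the False branch nothing is added
    · simp only [h]
      constructor
      · rintro (hm | ⟨j, hj, hp, rfl⟩)
        · exact Or.inl hm
        · exact Or.inr ⟨j, Or.inr hj, hp, rfl⟩
      · rintro (hm | ⟨j, (rfl | hj), hp, rfl⟩)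
        · exact Or.inl hm
        · exact absurd hp h
        · exact Or.inr ⟨j, hj, hp, rfl⟩

-- membership in the nested two-index fold
lemma mem_foldl_nested (l : List Int) (h : Int → List Int) (g : Int → Int → String)
    (P : String → Bool) (m : PySem.Set String) (x : String) :
    (x ∈ l.foldl
        (fun m i => (h i).foldl
          (fun m j => if P (g i j) then PySem.Set.add m (g i j) else m) m) m) ↔
      x ∈ m ∨ ∃ i ∈ l, ∃ j ∈ h i, P (g i j) = true ∧ x = g i j := by
  induction l generalizing m with
  | nil => simp
  | cons a l ih =>
    simp only [List.foldl_cons, ih, mem_foldl_addif, List.mem_cons]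
    constructor
    · rintro (⟨hm | hin⟩ | ⟨i, hi, rest⟩)
      · exact Or.inl hm
      · exact Or.inr ⟨a, Or.inl rfl, hin⟩
      · exact Or.inr ⟨i, Or.inr hi, rest⟩
    · rintro (hm | ⟨i, (rfl | hi), rest⟩)
      · exact Or.inl (Or.inl hm)
      · exact Or.inl (Or.inr rest)
      · exact Or.inr ⟨i, hi, rest⟩

-- a string is a slice t[i:j] with 0 ≤ i ≤ j ≤ len(t) iff it is a substring of t
lemma exists_slice_iff_isIn (t x : String) :
    (∃ i ∈ PySem.List.pyRange 0 (PySem.Str.len t + 1) 1,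
       ∃ j ∈ PySem.List.pyRange i (PySem.Str.len t + 1) 1,
         x = PySem.Str.slice t (some i) (some j)) ↔ PySem.Str.isIn x t = true := by
  rw [PySem.Str.isIn_iff_infix]
  constructor
  · rintro ⟨i, hi, j, hj, rfl⟩
    rw [PySem.List.mem_pyRange_one] at hi hj
    obtain ⟨hi0, hiu⟩ := hi
    obtain ⟨hij, hju⟩ := hj
    have hj0 : (0 : Int) ≤ j := le_trans hi0 hij
    have heq : (PySem.Str.slice t (some i) (some j)).toList =
        List.take (j.toNat - i.toNat) (List.drop i.toNat t.toList) := by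
      rw [PySem.Str.toList_slice, PySem.Chars.slice_eq_listSlice,
        ← Int.toNat_of_nonneg hi0, ← Int.toNat_of_nonneg hj0, PySem.List.slice_natCast]
      simp
      rw [max_eq_left hi0, max_eq_left hj0]
    rw [heq]
    exact (List.take_prefix _ _).isInfix.trans (List.drop_suffix _ _).isInfix
  · intro hinf
    obtain ⟨s₁, s₂, hts⟩ := hinf
    have hlen : s₁.length + x.toList.length + s₂.length = t.toList.length := by
      have h := congrArg List.length hts
      simp only [List.length_append] at h
      omega
    have hlt : PySem.Str.len t = (t.toList.length : Int) := PySem.Str.len_eq t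
    refine ⟨(s₁.length : Int), ?_, ((s₁.length + x.toList.length : Nat) : Int), ?_, ?_⟩
    · rw [PySem.List.mem_pyRange_one, hlt]
      constructor
      · exact_mod_cast Nat.zero_le _
      · omega
    · rw [PySem.List.mem_pyRange_one, hlt]
      constructor
      · push_cast; omega
      · push_cast; omega
    · apply String.toList_inj.mp
      rw [PySem.Str.toList_slice, PySem.Chars.slice_eq_listSlice, PySem.List.slice_natCast,
        ← hts]
      have hdrop : List.drop s₁.length (s₁ ++ x.toList ++ s₂) = x.toList ++ s₂ := by
        rw [List.append_assoc, List.drop_left]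
      rw [hdrop]
      have : s₁.length + x.toList.length - s₁.length = x.toList.length := by omega
      rw [this, List.take_left]

-- the matched set of a target contains exactly the names that are substrings of it
lemma contains_matched (names : List String) (t x : String) :
    PySem.Set.contains
        ((PySem.List.pyRange 0 (PySem.Str.len t + 1) 1).foldl
          (fun m i =>
            (PySem.List.pyRange i (PySem.Str.len t + 1) 1).foldl
              (fun m j =>
                if PySem.Set.contains (PySem.Set.ofList names) (PySem.Str.slice t (some i) (some j))
                then PySem.Set.add m (PySem.Str.slice t (some i) (some j)) else m)
              m)
          PySem.Set.empty) x = true ↔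
      (x ∈ names ∧ PySem.Str.isIn x t = true) := by
  rw [PySem.Set.contains_iff,
    mem_foldl_nested _ _ (fun i j => PySem.Str.slice t (some i) (some j))
      (fun s => PySem.Set.contains (PySem.Set.ofList names) s) PySem.Set.empty x]
  constructor
  · rintro (hm | ⟨i, hi, j, hj, hp, rfl⟩)
    · exact absurd hm (List.not_mem_nil)
    · refine ⟨?_, ?_⟩
      · exact (PySem.Set.mem_ofList names _).mp ((PySem.Set.contains_iff _ _).mp hp)
      · exact (exists_slice_iff_isIn t _).mp ⟨i, hi, j, hj, rfl⟩
  · rintro ⟨hmem, hin⟩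
    obtain ⟨i, hi, j, hj, hx⟩ := (exists_slice_iff_isIn t x).mpr hin
    refine Or.inr ⟨i, hi, j, hj, ?_, hx⟩
    rw [← hx]
    exact (PySem.Set.contains_iff _ _).mpr ((PySem.Set.mem_ofList names x).mpr hmem)

-- ===== VERDICT (by name: the statement is the Claim_ definition above) =====
theorem get_name_group_spec : Claim_equal_get_name_group := by
  intro d _
  simp only [Spec_get_name_group, get_name_group, get_name_group_alt]
  set names := PySem.List.sorted (PySem.Dict.keys (PySem.Dict.ofList d))
      (fun x => PySem.Str.len x) true with hnames
  congr 1
  apply PySem.List.foldl_congr_mem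
  intro acc t _
  congr 1
  apply List.filter_congr
  intro c hc
  rw [Bool.eq_iff_iff, contains_matched names t c]
  simp [hc]
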